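-- pv_equiv track=rewrite | github.com/Atyors/Yams | modules/score.py | grande
-- ===== SOURCE A (Python) =====
-- def compare(liste_des):
--     '''Compte le nombre de fois que chaque valeur est apparu dans le jet de dés.
--
--     :param liste_des: valeur des cinq dés
--     :type liste_des: list
--     :return: renvoie le nombre de chaque dés
--     :rtype: liste
--     '''
--
--     val = [0, 0, 0, 0, 0, 0]
--     for elem in liste_des:
--         if elem == 1:
--             val[0] += 1
--         elif elem == 2:
--             val[1] += 1
--         elif elem == 3:
--             val[2] += 1
--         elif elem == 4:
--             val[3] += 1
--         elif elem == 5: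
--             val[4] += 1
--         elif elem == 6:
--             val[5] += 1
--     return val
--
-- def grande(liste_des):
--     controle = compare(liste_des)
--     suite = 0
--     for n in range(len(controle)):
--         if controle[n] == 1:
--             suite += 1
--         else:
--             suite = 0
--         if suite == 5:
--             break
--     if suite == 5:
--         return 40
--     else:
--         return False
-- ===== SOURCE B (Python) =====
-- def grande(liste_des):
--     if all(liste_des.count(v) == 1 for v in (1, 2, 3, 4, 5)) \
--             or all(liste_des.count(v) == 1 for v in (2, 3, 4, 5, 6)):
--         return 40
--     return False
-- ===== Notes on version B (the rewrite author's own statement) =====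
-- stated objective: simpler
-- what changed: A builds a 6-slot tally array and then scans it for a run of five consecutive counts equal to 1 with a break; B drops the tally and the run-scan entirely and tests the two possible straights directly via count(v)==1 on 1..5 or 2..6.
import Mathlib
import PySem

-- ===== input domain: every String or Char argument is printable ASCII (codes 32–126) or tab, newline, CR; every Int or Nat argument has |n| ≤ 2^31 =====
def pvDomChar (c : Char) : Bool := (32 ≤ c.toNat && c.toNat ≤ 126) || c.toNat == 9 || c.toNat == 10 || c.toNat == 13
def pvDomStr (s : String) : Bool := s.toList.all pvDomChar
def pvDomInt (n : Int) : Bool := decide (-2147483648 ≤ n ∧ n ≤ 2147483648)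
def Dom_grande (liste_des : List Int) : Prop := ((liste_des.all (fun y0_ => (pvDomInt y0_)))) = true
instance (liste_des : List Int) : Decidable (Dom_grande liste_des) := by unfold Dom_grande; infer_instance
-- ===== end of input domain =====

-- B replaces A's 6-slot tally array plus run-of-five scan (with break) by two direct
-- count(v)==1 tests over 1..5 and 2..6 (simpler, same O(n) cost). Both Pythons return
-- 40 on a straight and False otherwise; under the Bool convention both ports encode
-- 40 as true and False as false.

-- ===== PORT A =====
-- helper compare: 6-slot tally of the values 1..6; the loop body (the if/elif chain, val[k] += 1
-- ported as set/getD) is the named step function compareStep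
def compareStep (val : List Int) (elem : Int) : List Int :=
  if elem = 1 then val.set 0 (val.getD 0 0 + 1)
  else if elem = 2 then val.set 1 (val.getD 1 0 + 1)
  else if elem = 3 then val.set 2 (val.getD 2 0 + 1)
  else if elem = 4 then val.set 3 (val.getD 3 0 + 1)
  else if elem = 5 then val.set 4 (val.getD 4 0 + 1)
  else if elem = 6 then val.set 5 (val.getD 5 0 + 1)
  else val

def compareA (liste_des : List Int) : List Int :=
  liste_des.foldl compareStep [0, 0, 0, 0, 0, 0]

-- A's run-scan loop with its break (stops as soon as suite reaches 5)
def loopA : List Int → Int → Int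
  | [], suite => suite
  | c :: rest, suite =>
      let suite := if c = 1 then suite + 1 else 0
      if suite = 5 then suite else loopA rest suite

def grande (liste_des : List Int) : Bool :=
  let controle := compareA liste_des
  let suite := loopA controle 0
  if suite = 5 then true else false

-- ===== PORT B =====
def grande_alt (liste_des : List Int) : Bool :=
  if ([1, 2, 3, 4, 5].all (fun v => liste_des.count v == 1))
      || ([2, 3, 4, 5, 6].all (fun v => liste_des.count v == 1)) then true
  else false

-- ===== PRECONDITION & SPEC =====
def Spec_grande (liste_des : List Int) (out : Bool) : Prop := out = grande_alt liste_des
instance (liste_des : List Int) (out : Bool) : Decidable (Spec_grande liste_des out) := by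
  unfold Spec_grande; infer_instance

-- ===== CLAIM (what is proved, stated in full; the proofs are below) =====
def Claim_equal_grande : Prop :=
  ∀ (liste_des : List Int), Dom_grande liste_des → Spec_grande liste_des (grande liste_des)

-- ===== LEMMAS AND PROOFS =====

-- the tally fold computes the counts of 1..6 on top of any start state of six slots
theorem compareA_spec (l : List Int) (v0 v1 v2 v3 v4 v5 : Int) :
    l.foldl compareStep [v0, v1, v2, v3, v4, v5] =
    [v0 + l.count 1, v1 + l.count 2, v2 + l.count 3,
     v3 + l.count 4, v4 + l.count 5, v5 + l.count 6] := by
  induction l generalizing v0 v1 v2 v3 v4 v5 with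
  | nil => simp
  | cons a t ih =>
      rw [List.foldl_cons]
      by_cases h1 : a = 1
      · subst h1; norm_num [compareStep]; rw [ih]; simp; omega
      · by_cases h2 : a = 2
        · subst h2; norm_num [compareStep]; rw [ih]; simp; omega
        · by_cases h3 : a = 3
          · subst h3; norm_num [compareStep]; rw [ih]; simp; omega
          · by_cases h4 : a = 4
            · subst h4; norm_num [compareStep]; rw [ih]; simp; omega
            · by_cases h5 : a = 5
              · subst h5; norm_num [compareStep]; rw [ih]; simp; omega
              · by_cases h6 : a = 6
                · subst h6; norm_num [compareStep]; rw [ih]; simp; omega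
                · simp only [compareStep, if_neg h1, if_neg h2, if_neg h3, if_neg h4, if_neg h5, if_neg h6]
                  rw [ih]
                  simp [h1, h2, h3, h4, h5, h6]

theorem compareA_counts (l : List Int) :
    compareA l = [l.count 1, l.count 2, l.count 3, l.count 4, l.count 5, l.count 6] := by
  have h := compareA_spec l 0 0 0 0 0 0
  simpa [compareA] using h

-- A's break-scan over the six counts and B's two direct tests agree on every input
theorem grande_eq_alt (l : List Int) : grande l = grande_alt l := by
  simp only [grande, grande_alt, compareA_counts l, List.all_cons, List.all_nil, Bool.and_true]
  generalize l.count 1 = c1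
  generalize l.count 2 = c2
  generalize l.count 3 = c3
  generalize l.count 4 = c4
  generalize l.count 5 = c5
  generalize l.count 6 = c6
  by_cases h1 : c1 = 1 <;> by_cases h2 : c2 = 1 <;> by_cases h3 : c3 = 1 <;>
    by_cases h4 : c4 = 1 <;> by_cases h5 : c5 = 1 <;> by_cases h6 : c6 = 1 <;>
    simp [loopA, h1, h2, h3, h4, h5, h6, Nat.cast_eq_one]

-- ===== VERDICT (by name: the statement is the Claim_ definition above) =====
theorem grande_spec : Claim_equal_grande := by
  intro l _
  unfold Spec_grande
  exact grande_eq_alt l
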